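-- pv_equiv track=rewrite | github.com/zhangxiangxiao/xjax | xjax/xnn.py | unpack_states
-- ===== SOURCE A (Python) =====
-- def unpack_states(states):
--     """Unpack states for container."""
--     new_states = {}
--     for key in (states if states is not None else {}):
--         for i in (states[key] if states[key] is not None else {}):
--             if i not in new_states:
--                 new_states[i] = {key: states[key][i]}
--             else:
--                 new_states[i][key] = states[key][i]
--     if len(new_states) == 0:
--         new_states = None
--     return new_states
-- ===== SOURCE B (Python) =====
-- def unpack_states(states):
--     """Unpack states for container."""
--     outer = states if states is not None else {}
--     inner_keys = list(dict.fromkeys(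
--         i for d in outer.values() if d is not None for i in d))
--     if not inner_keys:
--         return None
--     return {i: {k: outer[k][i] for k in outer
--                 if outer[k] is not None and i in outer[k]}
--             for i in inner_keys}
-- ===== Notes on version B (the rewrite author's own statement) =====
-- stated objective: simpler
-- what changed: B reverses the loop nesting: it first collects the ordered set of inner keys (dict.fromkeys over all non-None inner dicts), then builds each transposed row by one comprehension scanning the outer dict, instead of A's single accumulating pass that grows/mutates a dict-of-dicts entry by entry.
import Mathlib
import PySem

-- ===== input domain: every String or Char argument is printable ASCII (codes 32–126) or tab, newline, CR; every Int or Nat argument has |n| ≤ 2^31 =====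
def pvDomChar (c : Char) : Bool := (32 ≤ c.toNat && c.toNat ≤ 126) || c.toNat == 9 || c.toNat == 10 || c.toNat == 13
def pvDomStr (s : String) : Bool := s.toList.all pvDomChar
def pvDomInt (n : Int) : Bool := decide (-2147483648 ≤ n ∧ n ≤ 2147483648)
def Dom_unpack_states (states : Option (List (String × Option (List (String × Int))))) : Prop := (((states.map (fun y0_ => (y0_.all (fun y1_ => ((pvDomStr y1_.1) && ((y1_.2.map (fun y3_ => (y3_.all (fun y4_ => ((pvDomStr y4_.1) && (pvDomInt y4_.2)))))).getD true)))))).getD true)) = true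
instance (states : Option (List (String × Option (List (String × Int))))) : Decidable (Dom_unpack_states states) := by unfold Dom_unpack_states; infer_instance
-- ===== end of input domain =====

-- B transposes the nested dict by first collecting the ordered set of inner keys and then
-- building each row with one scan over the outer dict, instead of A's single accumulating
-- pass that grows and mutates a dict-of-dicts entry by entry (objective: simpler decomposition).

-- ===== PORT A =====
-- one step of A's inner loop: 'if i not in new_states: new_states[i] = {key: v} else: new_states[i][key] = v'
def pvStepA (key : String) (ns : PySem.Dict String (PySem.Dict String Int)) (iv : String × Int) :
    PySem.Dict String (PySem.Dict String Int) :=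
  if ns.contains iv.1 = false then
    ns.insert iv.1 (PySem.Dict.ofList [(key, iv.2)])
  else
    ns.modify iv.1 PySem.Dict.empty (fun d => d.insert key iv.2)

-- one step of A's outer loop: 'for i in (states[key] if states[key] is not None else {}): …'
def pvFoldA (ns : PySem.Dict String (PySem.Dict String Int))
    (kp : String × Option (List (String × Int))) : PySem.Dict String (PySem.Dict String Int) :=
  (kp.2.getD []).foldl (pvStepA kp.1) ns

def unpack_states (states : Option (List (String × Option (List (String × Int))))) :
    Option (List (String × List (String × Int))) :=
  let new_states := (states.getD []).foldl pvFoldA PySem.Dict.empty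
  if new_states.size = 0 then none
  else some (new_states.items.map (fun p => (p.1, p.2.items)))

-- ===== PORT B =====
-- the comprehension '{k: outer[k][i] for k in outer if outer[k] is not None and i in outer[k]}'
def pvRow (outer : List (String × Option (List (String × Int)))) (i : String) :
    List (String × Int) :=
  outer.filterMap (fun p => p.2.bind (fun d => ((PySem.Dict.mk d).get? i).map (fun v => (p.1, v))))

def unpack_states_alt (states : Option (List (String × Option (List (String × Int))))) :
    Option (List (String × List (String × Int))) :=
  let outer := states.getD []
  let innerKeys := PySem.List.dedup (outer.flatMap (fun p => (p.2.getD []).map Prod.fst))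
  if innerKeys = [] then none
  else some (innerKeys.map (fun i => (i, pvRow outer i)))

-- ===== PRECONDITION & SPEC =====
-- Pre_ excludes association lists in which the outer dict or some inner dict has duplicate keys:
-- such lists do not represent any Python dict (A's argument is a nested dict), so no input A runs on is excluded.
def Pre_unpack_states (states : Option (List (String × Option (List (String × Int))))) : Prop :=
  ((states.getD []).map Prod.fst).Nodup ∧
  ∀ p ∈ states.getD [], ((p.2.getD []).map Prod.fst).Nodup
instance (states : Option (List (String × Option (List (String × Int))))) : Decidable (Pre_unpack_states states) := by unfold Pre_unpack_states; infer_instance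

def pvWitness_unpack_states : (Option (List (String × Option (List (String × Int))))) :=
  some [("layer1", some [("w", 1), ("b", 2)]), ("layer2", none), ("layer3", some [("w", 3)])]

def Spec_unpack_states (states : Option (List (String × Option (List (String × Int))))) (out : Option (List (String × List (String × Int)))) : Prop := out = unpack_states_alt states
instance (states : Option (List (String × Option (List (String × Int))))) (out : Option (List (String × List (String × Int)))) : Decidable (Spec_unpack_states states out) := by unfold Spec_unpack_states; infer_instance

-- ===== CLAIM (what is proved, stated in full; the proofs are below) =====
def Claim_equal_unpack_states : Prop := ∀ (states : Option (List (String × Option (List (String × Int))))), Dom_unpack_states states → Pre_unpack_states states → Spec_unpack_states states (unpack_states states)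

-- ===== LEMMAS AND PROOFS =====

theorem pv_add_nil (y : String) : PySem.Set.add [] y = [y] := rfl

theorem pv_foldl_add (ys : List String) : ∀ (s : List String),
    List.foldl PySem.Set.add s ys =
      s ++ (List.foldl PySem.Set.add [] ys).filter (fun y => decide (y ∉ s)) := by
  induction ys with
  | nil => simp
  | cons y t ih =>
    intro s
    have hF : List.foldl PySem.Set.add [] (y :: t) =
        [y] ++ (List.foldl PySem.Set.add [] t).filter (fun z => decide (z ∉ ([y] : List String))) := by
      simpa [pv_add_nil] using ih [y]
    by_cases h : y ∈ s
    · have hadd : PySem.Set.add s y = s := by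
        simp [PySem.Set.add, h]
      simp only [List.foldl_cons, hadd, ih s, hF]
      rw [List.filter_append, List.filter_filter]
      have : List.filter (fun y => decide (y ∉ s)) [y] = [] := by simp [h]
      rw [this, List.nil_append]
      apply congrArg
      apply List.filter_congr
      intro z _
      by_cases hz : z ∈ s
      · simp [hz]
      · have : z ≠ y := fun e => hz (e ▸ h)
        simp [hz, this]
    · have hadd : PySem.Set.add s y = s ++ [y] := by
        simp [PySem.Set.add, h]
      simp only [List.foldl_cons, hadd, ih (s ++ [y]), hF]
      rw [List.filter_append, List.filter_filter]
      have h1 : List.filter (fun y_1 => decide (y_1 ∉ s)) [y] = [y] := by simp [h]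
      rw [h1, List.append_assoc]
      apply congrArg; apply congrArg
      apply List.filter_congr
      intro z _
      by_cases hz : z = y
      · simp [hz]
      · simp [hz]

theorem pv_dedup_append (xs ys : List String) :
    PySem.List.dedup (xs ++ ys) =
      PySem.List.dedup xs ++ (PySem.List.dedup ys).filter (fun y => decide (y ∉ xs)) := by
  have h1 : PySem.List.dedup (xs ++ ys) =
      List.foldl PySem.Set.add (PySem.List.dedup xs) ys := by
    simp [PySem.List.dedup, PySem.Set.ofList, List.foldl_append]
  rw [h1, pv_foldl_add]
  apply congrArg
  apply List.filter_congr
  intro z _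
  by_cases hz : z ∈ xs
  · simp [hz]
  · have hnd : z ∉ PySem.List.dedup xs := fun hh => hz ((PySem.List.mem_dedup xs z).1 hh)
    simp [hz]

theorem pv_dedup_of_nodup (xs : List String) (h : xs.Nodup) : PySem.List.dedup xs = xs := by
  induction xs with
  | nil => rfl
  | cons x t ih =>
    have hx : x ∉ t := (List.nodup_cons.1 h).1
    have ht := (List.nodup_cons.1 h).2
    have hc : PySem.List.dedup (x :: t) =
        PySem.List.dedup [x] ++ (PySem.List.dedup t).filter (fun y => decide (y ∉ ([x] : List String))) := by
      simpa using pv_dedup_append [x] t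
    rw [hc, ih ht]
    have : List.filter (fun y => decide (y ∉ ([x] : List String))) t = t := by
      apply List.filter_eq_self.2
      intro a ha
      simp only [List.mem_singleton, decide_eq_true_eq]
      exact fun e => hx (e ▸ ha)
    rw [this]
    rfl

def pvUpd (k : String) (d : List (String × Int)) (p : String × PySem.Dict String Int) :
    String × PySem.Dict String Int :=
  match (PySem.Dict.mk d).get? p.1 with
  | some v => (p.1, p.2.insert k v)
  | none => p

theorem pv_ofList_single (k : String) (v : Int) :
    PySem.Dict.ofList [(k, v)] = PySem.Dict.mk [(k, v)] := rfl

theorem pv_contains_mk_iff (ts : List (String × PySem.Dict String Int)) (i : String) :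
    (PySem.Dict.mk ts).contains i = true ↔ i ∈ ts.map Prod.fst := by
  simp [PySem.Dict.contains]

theorem pv_inner_fold (k : String) : ∀ (d : List (String × Int)) (ts : List (String × PySem.Dict String Int)),
    (d.map Prod.fst).Nodup → (ts.map Prod.fst).Nodup →
    d.foldl (pvStepA k) (PySem.Dict.mk ts) =
      PySem.Dict.mk (ts.map (pvUpd k d) ++
        (d.filter (fun q => decide (q.1 ∉ ts.map Prod.fst))).map
          (fun q => (q.1, PySem.Dict.ofList [(k, q.2)]))) := by
  intro d
  induction d with
  | nil =>
    intro ts _ _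
    simp only [List.foldl_nil, List.filter_nil, List.map_nil, List.append_nil]
    have : ts.map (pvUpd k []) = ts := by
      apply List.map_id''  -- map f l = l when f = id on members
      intro p
      simp [pvUpd, PySem.Dict.get?]
    rw [this]
  | cons q rest ih =>
    rcases q with ⟨i, v⟩
    intro ts hd hts
    have hdrest : (rest.map Prod.fst).Nodup := (List.nodup_cons.1 hd).2
    have hinotrest : i ∉ rest.map Prod.fst := (List.nodup_cons.1 hd).1
    rw [List.foldl_cons]
    by_cases hi : i ∈ ts.map Prod.fst
    · -- existing inner key: modify in place
      obtain ⟨p0, hp0mem, hp0fst⟩ := List.mem_map.1 hi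
      have hget : (PySem.Dict.mk ts).get? i = some p0.2 := by
        apply PySem.Dict.get?_of_mem_items
        · have he : p0 = (i, p0.2) := by
            rw [← hp0fst]
          exact he ▸ hp0mem
        · simpa [PySem.Dict.keys] using hts
      have hstep : pvStepA k (PySem.Dict.mk ts) (i, v) =
          PySem.Dict.mk (ts.map (fun p => if p.1 == i then (i, p0.2.insert k v) else p)) := by
        have hc : (PySem.Dict.mk ts).contains i = true := (pv_contains_mk_iff ts i).2 hi
        simp [pvStepA, hc, PySem.Dict.modify, PySem.Dict.getD, hget, PySem.Dict.insert]
      rw [hstep]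
      set ts2 := ts.map (fun p => if p.1 == i then (i, p0.2.insert k v) else p) with hts2
      have hkeys2 : ts2.map Prod.fst = ts.map Prod.fst := by
        rw [hts2, List.map_map]
        apply List.map_congr_left
        intro p _
        by_cases h : p.1 = i <;> simp [h]
      rw [ih ts2 hdrest (by rw [hkeys2]; exact hts)]
      congr 1
      rw [hkeys2]
      have hhead : List.filter (fun q => decide (q.1 ∉ ts.map Prod.fst)) ((i, v) :: rest) =
          List.filter (fun q => decide (q.1 ∉ ts.map Prod.fst)) rest := by
        simp [hi]
      rw [hhead]
      congr 1
      -- first parts equal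
      rw [hts2, List.map_map]
      apply List.map_congr_left
      intro p hp
      have hgr : (PySem.Dict.mk rest).get? i = none := by
        rw [PySem.Dict.get?_eq_none_iff_not_mem_keys]
        simpa [PySem.Dict.keys] using hinotrest
      by_cases h : p.1 = i
      · have h1 : (PySem.Dict.mk ts).get? p.1 = some p.2 :=
          PySem.Dict.get?_of_mem_items _ hp (by simpa [PySem.Dict.keys] using hts)
        have h2 : p.2 = p0.2 := by
          rw [h, hget] at h1
          exact (Option.some.inj h1).symm
        have hgd : (PySem.Dict.mk ((i, v) :: rest)).get? i = some v := by
          simp [PySem.Dict.get?]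
        simp [pvUpd, h, hgr, h2, hgd]
      · have hne : (p.1 == i) = false := by simp [h]
        have hskip : (PySem.Dict.mk ((i, v) :: rest)).get? p.1 = (PySem.Dict.mk rest).get? p.1 := by
          rw [PySem.Dict.get?_mk_cons]
          have hne2 : (i == p.1) = false := by
            simp only [beq_eq_false_iff_ne, ne_eq]
            exact fun e => h e.symm
          rw [hne2]
          simp
        simp only [Function.comp_apply, hne, Bool.false_eq_true, if_false, pvUpd, hskip]
    · -- new inner key: append singleton row
      have hstep : pvStepA k (PySem.Dict.mk ts) (i, v) =
          PySem.Dict.mk (ts ++ [(i, PySem.Dict.ofList [(k, v)])]) := by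
        have hc : (PySem.Dict.mk ts).contains i = false := by
          rw [← Bool.not_eq_true]
          intro hh
          exact hi ((pv_contains_mk_iff ts i).1 hh)
        simp [pvStepA, hc, PySem.Dict.insert]
      rw [hstep]
      set ts2 := ts ++ [(i, PySem.Dict.ofList [(k, v)])] with hts2
      have hkeys2 : ts2.map Prod.fst = ts.map Prod.fst ++ [i] := by simp [hts2]
      have hnd2 : (ts2.map Prod.fst).Nodup := by
        rw [hkeys2]
        simp only [List.nodup_append, List.nodup_singleton, true_and]
        refine ⟨hts, ?_⟩
        intro a ha b hb
        rw [List.mem_singleton] at hb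
        exact fun e => hi ((hb ▸ e) ▸ ha)
      rw [ih ts2 hdrest hnd2]
      congr 1
      rw [hts2, List.map_append]
      have hsingle : ([(i, PySem.Dict.ofList [(k, v)])].map (pvUpd k rest)) =
          [(i, PySem.Dict.ofList [(k, v)])] := by
        have hgr : (PySem.Dict.mk rest).get? i = none := by
          rw [PySem.Dict.get?_eq_none_iff_not_mem_keys]
          simpa [PySem.Dict.keys] using hinotrest
        simp [pvUpd, hgr]
      rw [hsingle]
      have hfilter : List.filter (fun q => decide (q.1 ∉ ts2.map Prod.fst)) rest =
          List.filter (fun q => decide (q.1 ∉ ts.map Prod.fst)) rest := by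
        apply List.filter_congr
        intro q hq
        have hqi : q.1 ≠ i := fun e => hinotrest (e ▸ List.mem_map_of_mem hq)
        rw [hkeys2]
        simp [hqi]
      have hmapfirst : ts.map (pvUpd k rest) = ts.map (pvUpd k ((i, v) :: rest)) := by
        apply List.map_congr_left
        intro p hp
        have hpi : p.1 ≠ i := fun e => hi (e ▸ List.mem_map_of_mem hp)
        have hskip : (PySem.Dict.mk ((i, v) :: rest)).get? p.1 = (PySem.Dict.mk rest).get? p.1 := by
          rw [PySem.Dict.get?_mk_cons]
          have hne2 : (i == p.1) = false := by
            simp only [beq_eq_false_iff_ne, ne_eq]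
            exact fun e => hpi e.symm
          rw [hne2]
          simp
        simp only [pvUpd, hskip]
      rw [hfilter, hmapfirst]
      have hhead : List.filter (fun q => decide (q.1 ∉ ts.map Prod.fst)) ((i, v) :: rest) =
          (i, v) :: List.filter (fun q => decide (q.1 ∉ ts.map Prod.fst)) rest := by
        simp [hi]
      rw [hhead]
      simp

theorem pvUpd_fst (k : String) (d : List (String × Int)) (p : String × PySem.Dict String Int) :
    (pvUpd k d p).1 = p.1 := by
  rw [pvUpd]
  cases (PySem.Dict.mk d).get? p.1 <;> rfl

theorem pvRow_cons (k : String) (od : Option (List (String × Int)))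
    (Lr : List (String × Option (List (String × Int)))) (j : String) :
    pvRow ((k, od) :: Lr) j =
      match (PySem.Dict.mk (od.getD [])).get? j with
      | some v => (k, v) :: pvRow Lr j
      | none => pvRow Lr j := by
  cases od with
  | none =>
    simp [pvRow, PySem.Dict.get?]
  | some d =>
    simp only [pvRow, List.filterMap_cons, Option.getD_some]
    cases hg : (PySem.Dict.mk d).get? j <;> simp [hg]

theorem pv_contains_false_of_not_mem (d : PySem.Dict String Int) (k : String)
    (h : k ∉ d.items.map Prod.fst) : d.contains k = false := by
  rw [← Bool.not_eq_true, PySem.Dict.contains]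
  simp only [List.any_eq_true, not_exists]
  intro q
  rintro ⟨hq, he⟩
  have hqe : q.1 = k := beq_iff_eq.1 he
  exact h (by rw [← hqe]; exact List.mem_map_of_mem hq)

theorem pv_outer_fold : ∀ (L : List (String × Option (List (String × Int))))
    (ts : List (String × PySem.Dict String Int)),
    (L.map Prod.fst).Nodup →
    (∀ p ∈ L, ((p.2.getD []).map Prod.fst).Nodup) →
    (ts.map Prod.fst).Nodup →
    (∀ p ∈ ts, ∀ q ∈ p.2.items, q.1 ∉ L.map Prod.fst) →
    L.foldl pvFoldA (PySem.Dict.mk ts) =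
      PySem.Dict.mk (ts.map (fun p => (p.1, PySem.Dict.mk (p.2.items ++ pvRow L p.1)))
        ++ ((PySem.List.dedup (L.flatMap (fun p => (p.2.getD []).map Prod.fst))).filter
              (fun i => decide (i ∉ ts.map Prod.fst))).map
            (fun i => (i, PySem.Dict.mk (pvRow L i)))) := by
  intro L
  induction L with
  | nil =>
    intro ts _ _ _ _
    simp only [List.foldl_nil, List.flatMap_nil]
    have hded : PySem.List.dedup ([] : List String) = [] := rfl
    rw [hded]
    simp only [List.filter_nil, List.map_nil, List.append_nil]
    have : ts.map (fun p => (p.1, PySem.Dict.mk (p.2.items ++ pvRow [] p.1))) = ts := by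
      apply List.map_id''
      intro p
      simp [pvRow]
    rw [this]
  | cons hd Lr ih =>
    rcases hd with ⟨k, od⟩
    intro ts hL hinner hts hrows
    set dl := od.getD [] with hdl
    have hdlnd : (dl.map Prod.fst).Nodup := hinner (k, od) (List.mem_cons_self)
    have hknotLr : k ∉ Lr.map Prod.fst := by
      have := List.nodup_cons.1 hL
      simpa using this.1
    have hLrnd : (Lr.map Prod.fst).Nodup := by
      have := List.nodup_cons.1 hL
      simpa using this.2
    -- characterize one outer step via pv_inner_fold
    have hstep : pvFoldA (PySem.Dict.mk ts) (k, od) =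
        PySem.Dict.mk (ts.map (pvUpd k dl) ++
          (dl.filter (fun q => decide (q.1 ∉ ts.map Prod.fst))).map
            (fun q => (q.1, PySem.Dict.ofList [(k, q.2)]))) := by
      rw [pvFoldA, ← hdl]
      exact pv_inner_fold k dl ts hdlnd hts
    set newE := (dl.filter (fun q => decide (q.1 ∉ ts.map Prod.fst))).map
        (fun q => (q.1, PySem.Dict.ofList [(k, q.2)])) with hnewE
    set ts1 := ts.map (pvUpd k dl) ++ newE with hts1
    have hkeys1 : ts1.map Prod.fst =
        ts.map Prod.fst ++ (dl.filter (fun q => decide (q.1 ∉ ts.map Prod.fst))).map Prod.fst := by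
      rw [hts1, List.map_append, hnewE, List.map_map, List.map_map]
      congr 1
      · apply List.map_congr_left
        intro p _
        exact pvUpd_fst k dl p
    have hnd1 : (ts1.map Prod.fst).Nodup := by
      rw [hkeys1]
      rw [List.nodup_append]
      refine ⟨hts, ?_, ?_⟩
      · exact List.Nodup.sublist (List.Sublist.map Prod.fst List.filter_sublist) hdlnd
      · intro a ha b hb
        obtain ⟨q, hq, hqa⟩ := List.mem_map.1 hb
        have := (List.mem_filter.1 hq).2
        rw [decide_eq_true_eq] at this
        exact fun e => this (hqa ▸ e ▸ ha)
    -- the per-row freshness invariant survives one step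
    have hrows1 : ∀ p ∈ ts1, ∀ q ∈ p.2.items, q.1 ∉ Lr.map Prod.fst := by
      intro p hp q hq
      rcases List.mem_append.1 hp with hp | hp
      · obtain ⟨p0, hp0, hp0e⟩ := List.mem_map.1 hp
        have hc : p0.2.contains k = false := by
          apply pv_contains_false_of_not_mem
          intro hk
          obtain ⟨q0, hq0, hq0e⟩ := List.mem_map.1 hk
          exact hrows p0 hp0 q0 hq0 (hq0e ▸ List.mem_cons_self)
        rw [pvUpd] at hp0e
        rcases hg : (PySem.Dict.mk dl).get? p0.1 with _ | v
        · rw [hg] at hp0e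
          subst hp0e
          exact fun hmem => hrows p0 hp0 q hq (List.mem_cons_of_mem _ hmem)
        · rw [hg] at hp0e
          subst hp0e
          rw [PySem.Dict.items_insert_of_not_contains p0.2 v hc] at hq
          rcases List.mem_append.1 hq with hq | hq
          · exact fun hmem => hrows p0 hp0 q hq (List.mem_cons_of_mem _ hmem)
          · rw [List.mem_singleton] at hq
            subst hq
            exact hknotLr
      · obtain ⟨q0, _, hq0e⟩ := List.mem_map.1 hp
        rw [← hq0e] at hq
        simp only [pv_ofList_single] at hq
        rw [List.mem_singleton] at hq
        subst hq
        exact hknotLr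
    have hinner' : ∀ p ∈ Lr, ((p.2.getD []).map Prod.fst).Nodup :=
      fun p hp => hinner p (List.mem_cons_of_mem _ hp)
    rw [List.foldl_cons, hstep, ih ts1 hLrnd hinner' hnd1 hrows1]
    congr 1
    -- abbreviations for the two row-builders
    have hflat : List.flatMap (fun p => List.map Prod.fst (p.2.getD [])) ((k, od) :: Lr) =
        dl.map Prod.fst ++ List.flatMap (fun p => List.map Prod.fst (p.2.getD [])) Lr := by
      simp [hdl]
    rw [hflat]
    set flatLr := List.flatMap (fun p => List.map Prod.fst (p.2.getD [])) Lr with hflatLr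
    -- (d) split the dedup of the appended key lists
    have hded : PySem.List.dedup (dl.map Prod.fst ++ flatLr) =
        dl.map Prod.fst ++ (PySem.List.dedup flatLr).filter
          (fun y => decide (y ∉ dl.map Prod.fst)) := by
      rw [pv_dedup_append, pv_dedup_of_nodup _ hdlnd]
    rw [hded, List.filter_append, List.map_append]
    -- (a) split the map over ts1
    rw [hts1, List.map_append, List.map_map]
    rw [List.append_assoc]
    congr 1
    -- (b) the surviving old rows gain exactly their pvRow-head
    · apply List.map_congr_left
      intro p hp
      have hc : p.2.contains k = false := by
        apply pv_contains_false_of_not_mem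
        intro hk
        obtain ⟨q0, hq0, hq0e⟩ := List.mem_map.1 hk
        exact hrows p hp q0 hq0 (hq0e ▸ List.mem_cons_self)
      simp only [Function.comp_apply, pvUpd]
      rw [pvRow_cons, ← hdl]
      rcases hg : (PySem.Dict.mk dl).get? p.1 with _ | v
      · rfl
      · simp only
        rw [PySem.Dict.items_insert_of_not_contains p.2 v hc, List.append_assoc]
        rfl
    rw [List.map_append]
    congr 1
    -- (c)/(e) the fresh rows are exactly the new inner keys of this entry
    · rw [hnewE, List.map_map, List.filter_map, List.map_map]
      apply List.map_congr_left
      intro q hq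
      have hqdl : q ∈ dl := List.mem_filter.1 hq |>.1
      have hgq : (PySem.Dict.mk dl).get? q.1 = some q.2 :=
        PySem.Dict.get?_of_mem_items _ hqdl (by simpa [PySem.Dict.keys] using hdlnd)
      simp only [Function.comp_apply, pv_ofList_single]
      rw [pvRow_cons, ← hdl, hgq]
      rfl
    -- (f) the remaining future keys: both filters agree and rows are untouched
    · have hks : List.map Prod.fst (List.map (pvUpd k dl) ts) ++ List.map Prod.fst newE =
          List.map Prod.fst ts ++
            List.map Prod.fst (List.filter (fun q => decide (q.1 ∉ List.map Prod.fst ts)) dl) := by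
        rw [← List.map_append]
        exact hkeys1
      have hfeq : (PySem.List.dedup flatLr).filter
            (fun i => decide (i ∉ List.map Prod.fst (List.map (pvUpd k dl) ts) ++ List.map Prod.fst newE)) =
          ((PySem.List.dedup flatLr).filter (fun y => decide (y ∉ dl.map Prod.fst))).filter
            (fun i => decide (i ∉ ts.map Prod.fst)) := by
        rw [List.filter_filter]
        apply List.filter_congr
        intro i _
        have hiff : (i ∉ List.map Prod.fst (List.map (pvUpd k dl) ts) ++ List.map Prod.fst newE) ↔
            ((i ∉ dl.map Prod.fst) ∧ (i ∉ ts.map Prod.fst)) := by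
          rw [hks, List.mem_append]
          constructor
          · intro h
            have hA : i ∉ List.map Prod.fst ts := fun hx => h (Or.inl hx)
            have hB : i ∉ List.map Prod.fst
                (List.filter (fun q => decide (q.1 ∉ List.map Prod.fst ts)) dl) :=
              fun hx => h (Or.inr hx)
            refine ⟨?_, hA⟩
            intro hdlmem
            obtain ⟨q, hq, hqe⟩ := List.mem_map.1 hdlmem
            exact hB (List.mem_map.2 ⟨q, List.mem_filter.2 ⟨hq, by simp [hqe, hA]⟩, hqe⟩)
          · rintro ⟨hdlm, htsm⟩ hmem
            rcases hmem with hmem | hmem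
            · exact htsm hmem
            · obtain ⟨q, hq, hqe⟩ := List.mem_map.1 hmem
              exact hdlm (List.mem_map.2 ⟨q, (List.mem_filter.1 hq).1, hqe⟩)
        calc decide (i ∉ List.map Prod.fst (List.map (pvUpd k dl) ts) ++ List.map Prod.fst newE)
            = decide ((i ∉ dl.map Prod.fst) ∧ (i ∉ ts.map Prod.fst)) := decide_eq_decide.2 hiff
          _ = (decide (i ∉ dl.map Prod.fst) && decide (i ∉ ts.map Prod.fst)) := by simp
          _ = _ := Bool.and_comm _ _
      rw [hfeq]
      apply List.map_congr_left
      intro i hi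
      have hidl : i ∉ dl.map Prod.fst := by
        have := (List.mem_filter.1 (List.mem_filter.1 hi).1).2
        simpa using this
      have hgi : (PySem.Dict.mk dl).get? i = none := by
        rw [PySem.Dict.get?_eq_none_iff_not_mem_keys]
        simpa [PySem.Dict.keys] using hidl
      rw [pvRow_cons, ← hdl, hgi]

theorem pv_main (states : Option (List (String × Option (List (String × Int)))))
    (hnd : ((states.getD []).map Prod.fst).Nodup)
    (hin : ∀ p ∈ states.getD [], ((p.2.getD []).map Prod.fst).Nodup) :
    unpack_states states = unpack_states_alt states := by
  set outer := states.getD [] with houter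
  set ik := PySem.List.dedup (outer.flatMap (fun p => (p.2.getD []).map Prod.fst)) with hik
  have hbuild : outer.foldl pvFoldA PySem.Dict.empty =
      PySem.Dict.mk (ik.map (fun i => (i, PySem.Dict.mk (pvRow outer i)))) := by
    have h := pv_outer_fold outer [] hnd hin (by simp) (by simp)
    rw [show (PySem.Dict.empty : PySem.Dict String (PySem.Dict String Int)) =
        PySem.Dict.mk [] from rfl, h]
    simp [hik, PySem.List.dedup]
  rw [unpack_states, unpack_states_alt]
  simp only [← houter, ← hik, hbuild]
  rcases hik0 : ik with _ | ⟨i0, ikr⟩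
  · simp [PySem.Dict.size]
  · have hlen : (PySem.Dict.mk ((i0 :: ikr).map (fun i => (i, PySem.Dict.mk (pvRow outer i))))).size ≠ 0 := by
      simp [PySem.Dict.size]
    simp only [hlen, if_false]
    rw [if_neg (by simp)]
    congr 1
    rw [List.map_map]
    rfl

-- ===== VERDICT (by name: the statement is the Claim_ definition above) =====
theorem unpack_states_spec : Claim_equal_unpack_states := by
  intro states _ hpre
  unfold Spec_unpack_states
  exact pv_main states hpre.1 hpre.2
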